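-- pv_equiv track=rewrite | github.com/mihir-s-05/persona-debate | src/debate_v_majority/shared/answers.py | strict_majority_answer
-- ===== SOURCE A (Python) =====
-- from collections import Counter
--
-- def strict_majority_answer(answers: list[str | None] | None) -> str | None:
--     """Return an answer only when it wins with more than half of all votes."""
--     if not answers:
--         return None
--     filtered = [str(answer) for answer in answers if answer is not None]
--     if not filtered:
--         return None
--     threshold = len(answers) / 2
--     counts = Counter(filtered)
--     for answer, count in counts.items():
--         if count > threshold:
--             return answer
--     return None
-- ===== SOURCE B (Python) =====
-- def strict_majority_answer(answers):
--     """Return an answer only when it wins with more than half of all votes.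
--
--     Boyer-Moore majority vote: one O(1)-space candidate pass, then one
--     verification recount against the original ballot count."""
--     if not answers:
--         return None
--     filtered = [str(answer) for answer in answers if answer is not None]
--     if not filtered:
--         return None
--     candidate = None
--     count = 0
--     for answer in filtered:
--         if count == 0:
--             candidate = answer
--             count = 1
--         elif answer == candidate:
--             count += 1
--         else:
--             count -= 1
--     if 2 * filtered.count(candidate) > len(answers):
--         return candidate
--     return None
-- ===== Notes on version B (the rewrite author's own statement) =====
-- stated objective: alternative
-- what changed: Replaces the Counter build plus scan over its items by a Boyer-Moore majority vote: an O(1)-space candidate-tracking pass over the filtered votes followed by a single verifying recount of that one candidate against len(answers)/2.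
import Mathlib
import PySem

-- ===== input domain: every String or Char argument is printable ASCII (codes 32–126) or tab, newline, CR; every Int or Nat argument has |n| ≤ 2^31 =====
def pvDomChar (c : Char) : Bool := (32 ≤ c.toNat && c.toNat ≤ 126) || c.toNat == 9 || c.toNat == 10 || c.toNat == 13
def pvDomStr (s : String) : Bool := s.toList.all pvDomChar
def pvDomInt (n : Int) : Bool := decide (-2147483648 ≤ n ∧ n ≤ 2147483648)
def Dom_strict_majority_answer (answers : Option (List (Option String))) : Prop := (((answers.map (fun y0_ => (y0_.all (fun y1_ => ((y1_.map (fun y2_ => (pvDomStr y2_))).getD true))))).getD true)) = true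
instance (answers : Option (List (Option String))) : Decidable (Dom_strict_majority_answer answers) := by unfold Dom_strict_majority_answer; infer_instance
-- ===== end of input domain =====

-- B replaces A's Counter-and-scan by a Boyer-Moore majority vote (candidate pass + verifying
-- recount): an alternative O(1)-extra-space algorithm with the same return value everywhere.

-- ===== PORT A =====
-- A counts with collections.Counter and returns the first counted answer above half of len(answers).
def strict_majority_answer (answers : Option (List (Option String))) : Option String :=
  match answers with
  | none => none                     -- 'if not answers' (None case)
  | some ans =>
    if ans = [] then none            -- 'if not answers' (empty-list case)
    else
      -- str(answer) on a str is the identity, so the comprehension is a filterMap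
      let filtered : List String := ans.filterMap id
      if filtered = [] then none
      else
        let counts := PySem.Dict.counter filtered
        -- 'count > threshold' with threshold = len(answers)/2 a half-integer and count an int:
        -- exact as 2*count > len(answers) (no float needed)
        (counts.items.find? (fun p => 2 * p.2 > PySem.List.len ans)).map (fun p => p.1)

-- ===== PORT B =====
-- one Boyer-Moore voting step: state = (candidate, count)
def bmStep (s : Option String × Int) (answer : String) : Option String × Int :=
  if s.2 = 0 then (some answer, 1)
  else if some answer = s.1 then (s.1, s.2 + 1)
  else (s.1, s.2 - 1)

def strict_majority_answer_alt (answers : Option (List (Option String))) : Option String :=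
  match answers with
  | none => none
  | some ans =>
    if ans = [] then none
    else
      let filtered : List String := ans.filterMap id
      if filtered = [] then none
      else
        let st := filtered.foldl bmStep (none, 0)
        match st.1 with
        | none => none   -- candidate still None: filtered.count(None) = 0, never a strict majority
        | some c =>      -- 'if 2 * filtered.count(candidate) > len(answers)'
          if 2 * (filtered.count c : Int) > PySem.List.len ans then some c else none

-- ===== PRECONDITION & SPEC =====
def Spec_strict_majority_answer (answers : Option (List (Option String))) (out : Option String) : Prop := out = strict_majority_answer_alt answers
instance (answers : Option (List (Option String))) (out : Option String) : Decidable (Spec_strict_majority_answer answers out) := by unfold Spec_strict_majority_answer; infer_instance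

-- ===== CLAIM (what is proved, stated in full; the proofs are below) =====
def Claim_equal_strict_majority_answer : Prop := ∀ (answers : Option (List (Option String))), Dom_strict_majority_answer answers → Spec_strict_majority_answer answers (strict_majority_answer answers)

-- ===== LEMMAS AND PROOFS =====

-- two distinct values cannot each occupy more than half of a list
lemma count_add_count_le (l : List String) (a b : String) (h : a ≠ b) :
    l.count a + l.count b ≤ l.length := by
  induction l with
  | nil => simp
  | cons y t ih =>
    simp only [List.count_cons, List.length_cons, beq_iff_eq]
    split_ifs with h1 h2
    · simp_all
    all_goals omega

-- weight of x in a Boyer-Moore state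
def bmF (x : String) (s : Option String × Int) : Int :=
  if some x = s.1 then s.2 else -s.2

-- per-step bound: one voting step raises the weight of x by at least 2·[x = y] - 1
lemma bm_step_bound (c : Option String) (cnt : Int) (x y : String) :
    (2 * if x = y then 1 else 0 : Int) + bmF x (c, cnt) ≤ 1 + bmF x (bmStep (c, cnt) y) := by
  simp only [bmStep, bmF]
  split_ifs <;> simp_all <;> omega

lemma bm_step_nonneg (c : Option String) (cnt : Int) (h0 : 0 ≤ cnt) (y : String) :
    0 ≤ (bmStep (c, cnt) y).2 := by
  simp only [bmStep]; split_ifs <;> simp <;> omega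

-- Boyer-Moore invariant: folding l moves the weight of every x up by at most l.length - 2·count
lemma bm_inv (l : List String) : ∀ (c : Option String) (cnt : Int), 0 ≤ cnt →
    0 ≤ (l.foldl bmStep (c, cnt)).2 ∧
    ∀ x : String, 2 * (l.count x : Int) + bmF x (c, cnt) ≤ l.length + bmF x (l.foldl bmStep (c, cnt)) := by
  induction l with
  | nil => intro c cnt h0; simpa using h0
  | cons y t ih =>
    intro c cnt h0
    obtain ⟨hpos, hbound⟩ := ih (bmStep (c, cnt) y).1 (bmStep (c, cnt) y).2 (bm_step_nonneg c cnt h0 y)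
    simp only [Prod.mk.eta] at hpos hbound
    refine ⟨by simpa using hpos, fun x => ?_⟩
    have hx := hbound x
    have hone := bm_step_bound c cnt x y
    simp only [List.foldl_cons, List.length_cons]
    rcases eq_or_ne x y with rfl | hxy
    · rw [if_pos rfl] at hone
      have hc : (x :: t).count x = t.count x + 1 := by simp
      rw [hc]; push_cast; omega
    · rw [if_neg hxy] at hone
      have hc : (y :: t).count x = t.count x := by simp [Ne.symm hxy]
      rw [hc]; push_cast; omega

-- a strict majority of l is the Boyer-Moore candidate
lemma bm_majority (l : List String) (x : String) (h : (l.length : Int) < 2 * l.count x) :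
    (l.foldl bmStep (none, 0)).1 = some x := by
  obtain ⟨hpos, hbound⟩ := bm_inv l none 0 le_rfl
  have hx := hbound x
  by_contra hne
  have : bmF x (none, 0) = 0 := by simp [bmF]
  have hend : bmF x (l.foldl bmStep (none, 0)) = -(l.foldl bmStep (none, 0)).2 := by
    rw [bmF, if_neg (fun e => hne e.symm)]
  omega

-- A's Counter scan is a find? over the distinct elements with their counts
lemma findA_eq (filtered : List String) (n : Int) :
    ((PySem.Dict.counter filtered).items.find? (fun p => 2 * p.2 > n)).map (fun p => p.1)
      = (PySem.Set.ofList filtered).find? (fun k => 2 * (filtered.count k : Int) > n) := by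
  rw [PySem.Dict.items_counter, List.find?_map, Option.map_map]
  simp [Function.comp_def]

theorem strict_majority_answer_core (ans : List (Option String)) (hne : ans ≠ [])
    (hf : ans.filterMap id ≠ []) :
    strict_majority_answer (some ans) = strict_majority_answer_alt (some ans) := by
  simp only [strict_majority_answer, strict_majority_answer_alt, if_neg hne, if_neg hf]
  set filtered := ans.filterMap id with hfil
  set n : Int := PySem.List.len ans with hn
  have hnlen : n = (ans.length : Int) := by simp [hn, PySem.List.len_eq]
  have hle : (filtered.length : Int) ≤ n := by
    rw [hnlen]; exact_mod_cast List.length_filterMap_le id ans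
  rw [findA_eq]
  by_cases hmaj : ∃ m : String, n < 2 * (filtered.count m : Int)
  · obtain ⟨m, hm⟩ := hmaj
    have hmemf : m ∈ filtered := by
      have : 0 < filtered.count m := by
        by_contra h
        have : filtered.count m = 0 := by omega
        rw [this] at hm; push_cast at hm; omega
      exact List.count_pos_iff.mp this
    have huniq : ∀ k : String, n < 2 * (filtered.count k : Int) → k = m := by
      intro k hk
      by_contra hkm
      have := count_add_count_le filtered k m hkm
      have : (filtered.count k : Int) + filtered.count m ≤ filtered.length := by exact_mod_cast this
      omega
    -- B side: the Boyer-Moore candidate is m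
    have hcand : (filtered.foldl bmStep (none, 0)).1 = some m :=
      bm_majority filtered m (by omega)
    rw [hcand]
    simp only [if_pos hm]
    -- A side: find? returns m (the unique satisfier, present among the distinct keys)
    have hsome : ((PySem.Set.ofList filtered).find? (fun k => 2 * (filtered.count k : Int) > n)).isSome := by
      rw [List.find?_isSome]
      exact ⟨m, (PySem.Set.mem_ofList _ _).mpr hmemf, by simpa using hm⟩
    obtain ⟨y, hy⟩ := Option.isSome_iff_exists.mp hsome
    have hpy := List.find?_some hy
    have : y = m := huniq y (by simpa using hpy)
    rw [hy, this]
  · push_neg at hmaj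
    have hnone : (PySem.Set.ofList filtered).find? (fun k => 2 * (filtered.count k : Int) > n) = none := by
      rw [List.find?_eq_none]
      intro x _
      simpa using hmaj x
    rw [hnone]
    cases hc : (filtered.foldl bmStep (none, 0)).1 with
    | none => rfl
    | some c => simp only [if_neg (by have := hmaj c; omega : ¬ 2 * (filtered.count c : Int) > n)]

-- ===== VERDICT (by name: the statement is the Claim_ definition above) =====
theorem strict_majority_answer_spec : Claim_equal_strict_majority_answer := by
  intro answers _
  unfold Spec_strict_majority_answer
  cases answers with
  | none => rfl
  | some ans =>
    by_cases hne : ans = []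
    · subst hne; rfl
    · by_cases hf : ans.filterMap id = []
      · simp only [strict_majority_answer, strict_majority_answer_alt, if_neg hne]
        rw [if_pos hf, if_pos hf]
      · exact strict_majority_answer_core ans hne hf
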